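-- pv_equiv track=rewrite | github.com/tmAviAki/RAG_project_v0.5 | server/app/code_ingest.py | _line_windows
-- ===== SOURCE A (Python) =====
-- from typing import Iterable, List, Tuple, Dict, Any, Optional
--
-- def _line_windows(lines: List[str], width: int, overlap: int) -> Iterable[Tuple[int,int]]:
--     i = 0; n = len(lines)
--     width = max(1, width); overlap = max(0, overlap)
--     while i < n:
--         j = min(n, i + width)
--         yield (i, j)
--         if j == n: break
--         i = max(i + width - overlap, i + 1)
-- ===== SOURCE B (Python) =====
-- def _line_windows(lines, width, overlap):
--     n = len(lines)
--     width = max(1, width)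
--     overlap = max(0, overlap)
--     step = max(1, width - overlap)
--     if n == 0:
--         return
--     # start of the LAST window, computed in closed form
--     last = 0 if n <= width else ((n - width + step - 1) // step) * step
--     out = []
--     s = last
--     while s >= 0:  # walk backwards from the last window to the first
--         out.append((s, min(n, s + width)))
--         s -= step
--     yield from reversed(out)
-- ===== Notes on version B (the rewrite author's own statement) =====
-- stated objective: alternative
-- what changed: B computes the start of the LAST window in closed form (ceil-division) and then builds the output back-to-front, walking start indices downwards to 0 and reversing at the end, instead of A's forward while-loop that terminates via a break when a window reaches the end.
import Mathlib
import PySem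

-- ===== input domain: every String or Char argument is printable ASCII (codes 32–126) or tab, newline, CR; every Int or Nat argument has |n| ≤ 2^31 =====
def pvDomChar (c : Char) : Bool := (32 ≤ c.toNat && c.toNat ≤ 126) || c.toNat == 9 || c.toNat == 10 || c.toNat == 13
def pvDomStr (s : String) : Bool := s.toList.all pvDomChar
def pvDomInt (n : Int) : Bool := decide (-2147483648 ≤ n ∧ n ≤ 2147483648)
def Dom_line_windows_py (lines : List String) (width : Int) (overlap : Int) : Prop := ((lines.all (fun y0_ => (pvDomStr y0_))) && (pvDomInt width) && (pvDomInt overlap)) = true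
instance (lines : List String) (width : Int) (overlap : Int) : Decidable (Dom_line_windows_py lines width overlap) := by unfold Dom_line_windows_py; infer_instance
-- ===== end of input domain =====

-- B computes the last window start in closed form and builds the output back-to-front
-- (descending starts, reversed at the end) instead of A's forward while/break scan; same values.

-- ===== PORT A =====
-- A's while-loop, recursing on the distance n - i (each step advances i by at least 1)
def lineWindowsLoopA (n width overlap : Int) (i : Int) : List (Int × Int) :=
  if h : i < n then
    let j := min n (i + width)
    (i, j) :: (if j = n then [] else lineWindowsLoopA n width overlap (max (i + width - overlap) (i + 1)))
  else []
termination_by (n - i).toNat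
decreasing_by
  have : i + 1 ≤ max (i + width - overlap) (i + 1) := le_max_right _ _
  omega

def line_windows_py (lines : List String) (width : Int) (overlap : Int) : List (Int × Int) :=
  let n : Int := lines.length
  let width' := max 1 width
  let overlap' := max 0 overlap
  lineWindowsLoopA n width' overlap' 0

-- ===== PORT B =====
-- B's backward while-loop: append windows for descending starts s, s-step, …, down past 0.
-- The hypothesis 1 ≤ step only justifies termination (B always calls it with step = max 1 (w-o)).
def lineWindowsBackB (n w step : Int) (hs : 1 ≤ step) (s : Int) (acc : List (Int × Int)) : List (Int × Int) :=
  if _h : 0 ≤ s then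
    lineWindowsBackB n w step hs (s - step) (acc ++ [(s, min n (s + w))])
  else acc
termination_by (s + 1).toNat
decreasing_by omega

def line_windows_py_alt (lines : List String) (width : Int) (overlap : Int) : List (Int × Int) :=
  let n : Int := lines.length
  let w := max 1 width
  let o := max 0 overlap
  let step := max 1 (w - o)
  if n = 0 then []
  else
    let last := if n ≤ w then 0 else (PySem.Int.floordiv (n - w + step - 1) step) * step
    (lineWindowsBackB n w step (le_max_left _ _) last []).reverse

-- ===== PRECONDITION & SPEC =====
def Spec_line_windows_py (lines : List String) (width : Int) (overlap : Int) (out : List (Int × Int)) : Prop := out = line_windows_py_alt lines width overlap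
instance (lines : List String) (width : Int) (overlap : Int) (out : List (Int × Int)) : Decidable (Spec_line_windows_py lines width overlap out) := by unfold Spec_line_windows_py; infer_instance

-- ===== CLAIM =====
def Claim_equal_line_windows_py : Prop := ∀ (lines : List String) (width : Int) (overlap : Int), Dom_line_windows_py lines width overlap → Spec_line_windows_py lines width overlap (line_windows_py lines width overlap)

-- ===== LEMMAS AND PROOFS =====

-- A's loop from start index j*step produces the ascending mapped range of m+1 windows,
-- when m is the exact number of further steps needed to reach the end.
theorem loopA_eq_map (n w o step : Int) (hw : 1 ≤ w) (ho : 0 ≤ o)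
    (hstep : step = max 1 (w - o)) :
    ∀ (m : Nat) (j : Int), j * step < n →
      n ≤ (j + m) * step + w →
      (0 < m → (j + (m : Int) - 1) * step + w < n) →
      lineWindowsLoopA n w o (j * step) =
        (PySem.List.pyRange j (j + (m : Int) + 1) 1).map (fun t => (t * step, min n (t * step + w))) := by
  have hs1 : 1 ≤ step := by rw [hstep]; exact le_max_left _ _
  have hsw : step ≤ w := by rw [hstep]; omega
  intro m
  induction m with
  | zero =>
    intro j hin hge _
    rw [lineWindowsLoopA]
    simp only [hin, dite_true]
    have hjn : min n (j * step + w) = n := by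
      simp at hge; omega
    rw [PySem.List.pyRange_one_cons (by omega), PySem.List.pyRange_one_eq_nil (by omega)]
    simp [hjn]
  | succ m ih =>
    intro j hin hge hlt
    push_cast at hge hlt
    have hlt' : (j + (m : Int)) * step + w < n := by
      have h := hlt (Nat.succ_pos m)
      have e : j + ((m : Int) + 1) - 1 = j + (m : Int) := by ring
      rw [e] at h; exact h
    have hiwlt : j * step + w < n := by
      have hmono : j * step ≤ (j + (m : Int)) * step := by
        have h0 : (0 : Int) ≤ (m : Int) := Int.natCast_nonneg m
        nlinarith
      linarith
    rw [lineWindowsLoopA]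
    simp only [hin, dite_true]
    have hne : ¬ (min n (j * step + w) = n) := by omega
    have hadv : max (j * step + w - o) (j * step + 1) = (j + 1) * step := by
      have h1 : j * step + w - o = j * step + (w - o) := by ring
      rw [h1, max_add_add_left, max_comm (w - o) 1, ← hstep]
      ring
    have hnext : (j + 1) * step < n := by
      have h1 : (j + 1) * step ≤ (j + (m : Int)) * step + step := by
        have h0 : (0 : Int) ≤ (m : Int) := Int.natCast_nonneg m
        nlinarith
      linarith
    have ihx := ih (j + 1) hnext
      (by have e : (j + 1 + (m : Int)) * step = (j + ((m : Int) + 1)) * step := by ring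
          rw [e]; linarith)
      (by intro hm
          have e : j + 1 + (m : Int) - 1 = j + (m : Int) := by ring
          rw [e]; exact hlt')
    rw [if_neg hne, hadv, ihx]
    push_cast
    conv_rhs => rw [PySem.List.pyRange_one_cons (show j < j + ((m : Int) + 1) + 1 by omega)]
    rw [List.map_cons]
    congr 3
    omega

-- B's backward loop from start j*step appends the m+1 windows in DESCENDING order.
theorem backB_eq_rev_map (n w step : Int) (hs : 1 ≤ step) :
    ∀ (j : Nat) (acc : List (Int × Int)),
      lineWindowsBackB n w step hs ((j : Int) * step) acc =
        acc ++ ((PySem.List.pyRange 0 ((j : Int) + 1) 1).map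
          (fun t => (t * step, min n (t * step + w)))).reverse := by
  intro j
  induction j with
  | zero =>
    intro acc
    simp only [Nat.cast_zero, zero_mul]
    rw [lineWindowsBackB, dif_pos le_rfl]
    rw [lineWindowsBackB, dif_neg (by omega)]
    rw [PySem.List.pyRange_one_cons (by omega), PySem.List.pyRange_one_eq_nil (by omega)]
    simp
  | succ j ih =>
    intro acc
    rw [lineWindowsBackB]
    have hpos : (0 : Int) ≤ ((j : Int) + 1) * step := by positivity
    push_cast
    rw [dif_pos hpos]
    have e : ((j : Int) + 1) * step - step = (j : Int) * step := by ring
    rw [e, ih]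
    rw [PySem.List.pyRange_one_succ_right (show (0 : Int) ≤ (j : Int) + 1 by positivity)]
    simp

-- ceil-division facts for B's closed-form last-window index, in the n > w case
theorem count_aux (n w step : Int) (hs : 1 ≤ step) (hnw : w < n) :
    0 < PySem.Int.floordiv (n - w + step - 1) step ∧
    n ≤ (PySem.Int.floordiv (n - w + step - 1) step) * step + w ∧
    (PySem.Int.floordiv (n - w + step - 1) step - 1) * step + w < n := by
  have hkdef : PySem.Int.floordiv (n - w + step - 1) step = (n - w + step - 1) / step :=
    PySem.Int.floordiv_eq_ediv_of_pos (by omega)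
  rw [hkdef]
  have hdm := Int.emod_add_mul_ediv (n - w + step - 1) step
  have hr0 : 0 ≤ (n - w + step - 1) % step := Int.emod_nonneg _ (by omega)
  have hr1 : (n - w + step - 1) % step < step := Int.emod_lt_of_pos _ (by omega)
  set q := (n - w + step - 1) / step with hq
  set r := (n - w + step - 1) % step with hr
  have heq : n - w + step - 1 = r + step * q := hdm.symm
  have hqpos : 0 < q := by nlinarith
  refine ⟨hqpos, by nlinarith, by nlinarith⟩

-- the two window productions agree, stated over plain integer variables
theorem main_aux (n w o step : Int) (hn0 : 0 ≤ n) (hw1 : 1 ≤ w) (ho0 : 0 ≤ o)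
    (hstep : step = max 1 (w - o)) (hs : 1 ≤ step) :
    lineWindowsLoopA n w o 0 =
      (if n = 0 then ([] : List (Int × Int)) else
        (lineWindowsBackB n w step hs
          (if n ≤ w then 0 else (PySem.Int.floordiv (n - w + step - 1) step) * step)
          []).reverse) := by
  by_cases hz : n = 0
  · subst hz
    rw [if_pos rfl, lineWindowsLoopA]
    norm_num
  · rw [if_neg hz]
    by_cases hle : n ≤ w
    · rw [if_pos hle]
      have hA := loopA_eq_map n w o step hw1 ho0 hstep 0 0 (by simp; omega) (by push_cast; omega) (by omega)
      have hB := backB_eq_rev_map n w step hs 0 []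
      simp only [Nat.cast_zero, zero_mul, zero_add, List.nil_append] at hA hB
      rw [hA, hB]
      norm_num
    · rw [if_neg hle]
      obtain ⟨hkpos, hk1, hk2⟩ := count_aux n w step hs (by omega)
      set k := PySem.Int.floordiv (n - w + step - 1) step with hk
      have hmk : ((k.toNat : Int)) = k := Int.toNat_of_nonneg (le_of_lt hkpos)
      have hA := loopA_eq_map n w o step hw1 ho0 hstep k.toNat 0
        (by simp; omega)
        (by rw [hmk]; simpa using hk1)
        (by intro hm; rw [hmk]; simpa using hk2)
      have hB := backB_eq_rev_map n w step hs k.toNat []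
      rw [hmk] at hA hB
      simp only [zero_mul, zero_add, List.nil_append] at hA hB
      rw [hA, hB]
      simp

-- ===== VERDICT =====
theorem line_windows_py_spec : Claim_equal_line_windows_py := by
  intro lines width overlap _
  unfold Spec_line_windows_py line_windows_py line_windows_py_alt
  exact main_aux (lines.length : Int) (max 1 width) (max 0 overlap)
    (max 1 (max 1 width - max 0 overlap)) (by positivity) (le_max_left _ _) (le_max_left _ _)
    rfl (le_max_left _ _)
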